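-- pv_equiv track=rewrite | github.com/YS-2357/Coding_Test | CodePlus/코딩 테스트 준비 - 기초/그외/fruit_combinations.py | fruit_combinations
-- ===== SOURCE A (Python) =====
-- from itertools import combinations
--
-- def fruit_combinations(fruit_list, k):
--     result_set = set()
--     for combo in combinations(fruit_list, k):
--         taste = 0
--         for f in combo:
--             taste |= int(f, 2)  # 비트 OR 합치기
--         result_set.add(taste)
--     return len(result_set)
-- ===== SOURCE B (Python) =====
-- def fruit_combinations(fruit_list, k):
--     n = len(fruit_list)
--     if k == 0:
--         return 1
--     if k > n:
--         return 0
--     dp = [{0}] + [set() for _ in range(k)]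
--     for f in fruit_list:
--         v = int(f, 2)
--         dp = [dp[0]] + [higher | {x | v for x in lower}
--                         for lower, higher in zip(dp, dp[1:])]
--     return len(dp[k])
-- ===== Notes on version B (the rewrite author's own statement) =====
-- stated objective: faster
-- what changed: Replaces enumeration of all C(n,k) combinations by a count-indexed dynamic programming over k+1 sets of achievable OR-values (dp[j+1] |= {x|v for x in dp[j]} per fruit), returning len(dp[k]).
import Mathlib
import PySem

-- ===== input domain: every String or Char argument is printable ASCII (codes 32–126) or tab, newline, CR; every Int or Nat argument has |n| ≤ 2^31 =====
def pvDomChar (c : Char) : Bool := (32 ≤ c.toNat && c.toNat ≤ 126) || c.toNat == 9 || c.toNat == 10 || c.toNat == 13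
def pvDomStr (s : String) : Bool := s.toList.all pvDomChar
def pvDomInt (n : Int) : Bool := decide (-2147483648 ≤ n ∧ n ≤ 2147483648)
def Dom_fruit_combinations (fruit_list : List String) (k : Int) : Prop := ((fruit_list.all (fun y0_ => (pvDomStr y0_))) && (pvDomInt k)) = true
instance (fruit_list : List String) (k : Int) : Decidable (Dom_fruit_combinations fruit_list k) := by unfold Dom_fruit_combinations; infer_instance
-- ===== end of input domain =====

-- B replaces A's enumeration of all k-combinations by a count-indexed DP over sets of achievable OR-values.


-- ===== PORT A =====
-- int(f, 2); `none` (Python ValueError) is excluded by Pre_ wherever a fruit is actually parsed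
def pvVal (f : String) : Int := (PySem.Int.ofStrBase? f 2).getD 0

-- itertools.combinations(xs, m) in its generation order (lexicographic by index)
def pvCombos : Nat → List String → List (List String)
  | 0, _ => [[]]
  | _+1, [] => []
  | m+1, f :: rest => (pvCombos m rest).map (fun c => f :: c) ++ pvCombos (m+1) rest

def fruit_combinations (fruit_list : List String) (k : Int) : Int :=
  if k < 0 then 0  -- itertools.combinations raises ValueError for k < 0; excluded by Pre_ (total guard only)
  else
    PySem.Set.len
      ((pvCombos k.toNat fruit_list).foldl
        (fun result_set combo =>
          PySem.Set.add result_set (combo.foldl (fun taste f => PySem.Int.bor taste (pvVal f)) 0))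
        PySem.Set.empty)

-- ===== PORT B =====
-- one pass of B's loop body: dp = [dp[0]] + [higher | {x | v for x in lower} for lower, higher in zip(dp, dp[1:])]
def pvStep (v : Int) (dp : List (PySem.Set Int)) : List (PySem.Set Int) :=
  PySem.List.pyGetD dp 0 PySem.Set.empty ::
    ((dp.zip (PySem.List.slice dp (some 1) none)).map
      (fun p => PySem.Set.union p.2 (PySem.Set.ofList (p.1.map (fun x => PySem.Int.bor x v)))))

def fruit_combinations_alt (fruit_list : List String) (k : Int) : Int :=
  if k = 0 then 1
  else if k > (fruit_list.length : Int) then 0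
  else
    let dp0 : List (PySem.Set Int) :=
      PySem.Set.ofList [0] :: (List.range k.toNat).map (fun _ => (PySem.Set.empty : PySem.Set Int))
    let dpF := fruit_list.foldl (fun dp f => pvStep (pvVal f) dp) dp0
    PySem.Set.len (PySem.List.pyGetD dpF k PySem.Set.empty)

-- ===== PRECONDITION & SPEC =====
-- A raises ValueError when k < 0 (itertools.combinations) or when some fruit gets parsed and is not a
-- base-2 integer literal; fruits are only parsed when 0 < k ≤ len(fruit_list) (otherwise A returns without parsing any).
def Pre_fruit_combinations (fruit_list : List String) (k : Int) : Prop :=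
  0 ≤ k ∧ (k = 0 ∨ (fruit_list.length : Int) < k ∨ ∀ f ∈ fruit_list, (PySem.Int.ofStrBase? f 2).isSome = true)
instance (fruit_list : List String) (k : Int) : Decidable (Pre_fruit_combinations fruit_list k) := by
  unfold Pre_fruit_combinations; infer_instance

def pvWitness_fruit_combinations : List String × Int := (["10", "1", "101"], 2)

def Spec_fruit_combinations (fruit_list : List String) (k : Int) (out : Int) : Prop := out = fruit_combinations_alt fruit_list k
instance (fruit_list : List String) (k : Int) (out : Int) : Decidable (Spec_fruit_combinations fruit_list k out) := by unfold Spec_fruit_combinations; infer_instance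

-- ===== CLAIM (what is proved, stated in full; the proofs are below) =====
def Claim_equal_fruit_combinations : Prop := ∀ (fruit_list : List String) (k : Int), Dom_fruit_combinations fruit_list k → Pre_fruit_combinations fruit_list k → Spec_fruit_combinations fruit_list k (fruit_combinations fruit_list k)

-- ===== LEMMAS AND PROOFS =====

lemma pvCombos_len_lt (m : Nat) (xs : List String) (h : xs.length < m) : pvCombos m xs = [] := by
  induction xs generalizing m with
  | nil => cases m with
    | zero => omega
    | succ m' => rfl
  | cons f rest ih =>
    cases m with
    | zero => omega
    | succ m' =>
      simp only [pvCombos]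
      rw [ih m' (by simpa using h), ih (m'+1) (by simp at h ⊢; omega)]
      rfl

lemma pvStep_length (v : Int) (dp : List (PySem.Set Int)) (hdp : dp ≠ []) :
    (pvStep v dp).length = dp.length := by
  simp [pvStep, PySem.List.slice_from_one]
  cases dp with
  | nil => exact absurd rfl hdp
  | cons a l => simp


lemma pvStep_mem (v : Int) (dp : List (PySem.Set Int)) (K : Nat) (hlen : dp.length = K + 1)
    (j : Nat) (hj : j ≤ K) (x : Int) :
    x ∈ (pvStep v dp).getD j PySem.Set.empty ↔
      (j = 0 ∧ x ∈ dp.getD 0 PySem.Set.empty) ∨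
      (∃ j', j = j' + 1 ∧ (x ∈ dp.getD (j' + 1) PySem.Set.empty ∨
        ∃ y ∈ dp.getD j' PySem.Set.empty, PySem.Int.bor y v = x)) := by
  cases j with
  | zero =>
    simp [pvStep, PySem.List.pyGetD_zero]
  | succ j' =>
    have hz : (dp.zip (PySem.List.slice dp (some 1) none)).length = K := by
      simp [PySem.List.slice_from_one]; omega
    have hj' : j' < K := by omega
    have hL : ((dp.zip (PySem.List.slice dp (some 1) none)).map
        (fun p => PySem.Set.union p.2 (PySem.Set.ofList (p.1.map (fun x => PySem.Int.bor x v))))).getD j' PySem.Set.empty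
        = PySem.Set.union (dp[j'+1]'(by omega) : PySem.Set Int)
            (PySem.Set.ofList (((dp[j']'(by omega) : PySem.Set Int)).map (fun x => PySem.Int.bor x v))) := by
      rw [List.getD_eq_getElem _ _ (by rw [List.length_map, hz]; exact hj')]
      simp [PySem.List.slice_from_one, List.getElem_zip, List.getElem_tail]
    have hd1 : dp.getD (j'+1) PySem.Set.empty = dp[j'+1]'(by omega) := List.getD_eq_getElem _ _ (by omega)
    have hd0 : dp.getD j' PySem.Set.empty = dp[j']'(by omega) := List.getD_eq_getElem _ _ (by omega)
    simp only [pvStep, List.getD_cons_succ, hL, PySem.Set.mem_union,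
      PySem.Set.mem_ofList, List.mem_map]
    constructor
    · rintro (h | ⟨y, hy, rfl⟩)
      · exact Or.inr ⟨j', rfl, Or.inl (by rw [hd1]; exact h)⟩
      · exact Or.inr ⟨j', rfl, Or.inr ⟨y, by rw [hd0]; exact hy, rfl⟩⟩
    · rintro (⟨h0, _⟩ | ⟨j'', he, h | ⟨y, hy, hb⟩⟩)
      · omega
      · obtain rfl : j'' = j' := by omega
        rw [hd1] at h
        exact Or.inl h
      · obtain rfl : j'' = j' := by omega
        rw [hd0] at hy
        exact Or.inr ⟨y, hy, hb⟩

def pvFoldOr (y : Int) (c : List String) : Int := c.foldl (fun t f => PySem.Int.bor t (pvVal f)) y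

def pvLoop (xs : List String) (dp : List (PySem.Set Int)) : List (PySem.Set Int) :=
  xs.foldl (fun dp f => pvStep (pvVal f) dp) dp

lemma pvCombos_zero (xs : List String) : pvCombos 0 xs = [[]] := by cases xs <;> rfl

lemma pvCombos_mem_cons {m : Nat} {f : String} {rest : List String} {c : List String}
    (h : c ∈ pvCombos m rest) : c ∈ pvCombos m (f :: rest) := by
  cases m with
  | zero => rw [pvCombos_zero] at h ⊢; exact h
  | succ m' => simp only [pvCombos, List.mem_append]; exact Or.inr h

lemma pvStep_mem_of_mem (v : Int) (dp : List (PySem.Set Int)) (K : Nat) (hlen : dp.length = K + 1)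
    (i : Nat) (hi : i ≤ K) (y : Int) (hy : y ∈ dp.getD i PySem.Set.empty) :
    y ∈ (pvStep v dp).getD i PySem.Set.empty := by
  rw [pvStep_mem v dp K hlen i hi y]
  cases i with
  | zero => exact Or.inl ⟨rfl, hy⟩
  | succ i' => exact Or.inr ⟨i', rfl, Or.inl hy⟩

lemma pvLoop_mem (xs : List String) : ∀ (dp : List (PySem.Set Int)) (K : Nat),
    dp.length = K + 1 → ∀ j, j ≤ K → ∀ x : Int,
    (x ∈ (pvLoop xs dp).getD j PySem.Set.empty ↔
      ∃ i, i ≤ j ∧ ∃ y ∈ dp.getD i PySem.Set.empty,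
        ∃ c ∈ pvCombos (j - i) xs, pvFoldOr y c = x) := by
  induction xs with
  | nil =>
    intro dp K hlen j hj x
    simp only [pvLoop, List.foldl_nil]
    constructor
    · intro h
      exact ⟨j, le_refl j, x, h, [], by rw [Nat.sub_self, pvCombos_zero]; exact List.mem_singleton.mpr rfl, rfl⟩
    · rintro ⟨i, hij, y, hy, c, hc, rfl⟩
      rcases Nat.eq_zero_or_eq_succ_pred (j - i) with hmi | hmi
      · obtain rfl : i = j := by omega
        obtain rfl : c = [] := by rw [hmi, pvCombos_zero] at hc; simpa using hc
        exact hy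
      · rw [hmi] at hc
        simp [pvCombos] at hc
  | cons f rest ih =>
    intro dp K hlen j hj x
    have hne : dp ≠ [] := by intro h; rw [h] at hlen; simp at hlen
    have hlen' : (pvStep (pvVal f) dp).length = K + 1 := by
      rw [pvStep_length _ _ hne, hlen]
    show x ∈ (pvLoop rest (pvStep (pvVal f) dp)).getD j PySem.Set.empty ↔ _
    rw [ih (pvStep (pvVal f) dp) K hlen' j hj x]
    constructor
    · rintro ⟨i, hij, y, hy, c, hc, rfl⟩
      rw [pvStep_mem (pvVal f) dp K hlen i (le_trans hij hj) y] at hy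
      rcases hy with ⟨rfl, hy0⟩ | ⟨i', rfl, hyi | ⟨y', hy', rfl⟩⟩
      · exact ⟨0, Nat.zero_le _, y, hy0, c, pvCombos_mem_cons hc, rfl⟩
      · exact ⟨i' + 1, hij, y, hyi, c, pvCombos_mem_cons hc, rfl⟩
      · refine ⟨i', by omega, y', hy', f :: c, ?_, rfl⟩
        have hsub : j - i' = (j - (i' + 1)) + 1 := by omega
        rw [hsub]
        simp only [pvCombos, List.mem_append, List.mem_map]
        exact Or.inl ⟨c, hc, rfl⟩
    · rintro ⟨i, hij, y, hy, c, hc, rfl⟩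
      rcases Nat.eq_zero_or_eq_succ_pred (j - i) with hmi | hmi
      · obtain rfl : i = j := by omega
        obtain rfl : c = [] := by rw [hmi, pvCombos_zero] at hc; simpa using hc
        exact ⟨i, le_refl i, y, pvStep_mem_of_mem _ _ _ hlen i hj y hy, [],
          by rw [Nat.sub_self, pvCombos_zero]; exact List.mem_singleton.mpr rfl, rfl⟩
      · rw [hmi] at hc
        simp only [pvCombos, List.mem_append, List.mem_map] at hc
        rcases hc with ⟨c', hc', rfl⟩ | hc'
        · refine ⟨i + 1, by omega, PySem.Int.bor y (pvVal f), ?_, c', ?_, rfl⟩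
          · rw [pvStep_mem (pvVal f) dp K hlen (i+1) (by omega) _]
            exact Or.inr ⟨i, rfl, Or.inr ⟨y, hy, rfl⟩⟩
          · have : j - (i + 1) = j - i - 1 := by omega
            rw [this, hmi]
            simpa using hc'
        · refine ⟨i, hij, y, pvStep_mem_of_mem _ _ _ hlen i (le_trans hij hj) y hy, c, ?_, rfl⟩
          rw [hmi]
          exact hc'

lemma pvStep_nodup (v : Int) (dp : List (PySem.Set Int))
    (h : ∀ j, (dp.getD j PySem.Set.empty).Nodup) :
    ∀ j, ((pvStep v dp).getD j PySem.Set.empty).Nodup := by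
  intro j
  cases j with
  | zero => simpa [pvStep, PySem.List.pyGetD_zero] using h 0
  | succ j' =>
    simp only [pvStep, List.getD_cons_succ]
    by_cases hlt : j' < ((dp.zip (PySem.List.slice dp (some 1) none)).map
      (fun p => PySem.Set.union p.2 (PySem.Set.ofList (p.1.map (fun x => PySem.Int.bor x v))))).length
    · rw [List.getD_eq_getElem _ _ hlt]
      have hd : j' + 1 < dp.length := by
        simp [PySem.List.slice_from_one] at hlt
        omega
      simp only [List.getElem_map, List.getElem_zip, PySem.List.slice_from_one, List.getElem_tail]
      apply PySem.Set.nodup_union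
      have := h (j' + 1)
      rwa [List.getD_eq_getElem _ _ hd] at this
    · rw [List.getD_eq_default _ _ (le_of_not_gt hlt)]
      exact List.nodup_nil

lemma pvLoop_nodup (xs : List String) : ∀ (dp : List (PySem.Set Int)),
    (∀ j, (dp.getD j PySem.Set.empty).Nodup) →
    ∀ j, ((pvLoop xs dp).getD j PySem.Set.empty).Nodup := by
  induction xs with
  | nil => intro dp h j; exact h j
  | cons f rest ih =>
    intro dp h j
    exact ih (pvStep (pvVal f) dp) (pvStep_nodup (pvVal f) dp h) j

lemma pvGetD_map_const (K : Nat) : ∀ m, (((List.range K).map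
    (fun _ => (PySem.Set.empty : PySem.Set Int))).getD m PySem.Set.empty) = PySem.Set.empty := by
  intro m
  by_cases hlt : m < ((List.range K).map (fun _ => (PySem.Set.empty : PySem.Set Int))).length
  · rw [List.getD_eq_getElem _ _ hlt]; simp
  · rw [List.getD_eq_default _ _ (le_of_not_gt hlt)]

lemma pvEq_zero (fl : List String) : fruit_combinations fl 0 = fruit_combinations_alt fl 0 := by
  simp [fruit_combinations, fruit_combinations_alt, pvCombos_zero, PySem.Set.len_eq,
    PySem.Set.add, PySem.Set.empty, PySem.Set.contains]

lemma pvEq_big (fl : List String) (k : Int) (h0 : 0 ≤ k) (hn : (fl.length : Int) < k) :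
    fruit_combinations fl k = fruit_combinations_alt fl k := by
  have hA : pvCombos k.toNat fl = [] := pvCombos_len_lt _ _ (by omega)
  have hk0 : ¬ k = 0 := by omega
  have hkneg : ¬ k < 0 := by omega
  simp [fruit_combinations, fruit_combinations_alt, hA, PySem.Set.len_eq, PySem.Set.empty,
    hkneg, hn, hk0]

lemma pvOfList_zero : PySem.Set.ofList [(0:Int)] = [0] := by decide

lemma pvEq_main (fl : List String) (k : Int) (h0 : 0 < k) (hn : k ≤ (fl.length : Int)) :
    fruit_combinations fl k = fruit_combinations_alt fl k := by
  have hK : ((k.toNat : Int)) = k := Int.toNat_of_nonneg (by omega)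
  set K := k.toNat with hKdef
  have hAfold : (pvCombos K fl).foldl
      (fun result_set combo =>
        PySem.Set.add result_set (combo.foldl (fun taste f => PySem.Int.bor taste (pvVal f)) 0))
      PySem.Set.empty
      = PySem.Set.ofList ((pvCombos K fl).map (pvFoldOr 0)) := by
    rw [PySem.Set.ofList_eq_foldl, List.foldl_map]
    rfl
  set dp0 : List (PySem.Set Int) :=
    PySem.Set.ofList [0] :: (List.range K).map (fun _ => (PySem.Set.empty : PySem.Set Int)) with hdp0
  have hlen0 : dp0.length = K + 1 := by simp [hdp0]
  have hgd0 : dp0.getD 0 PySem.Set.empty = [0] := by rw [hdp0]; simp [pvOfList_zero]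
  have hgds : ∀ i', dp0.getD (i' + 1) PySem.Set.empty = PySem.Set.empty := by
    intro i'; rw [hdp0]; simp only [List.getD_cons_succ]; exact pvGetD_map_const K i'
  have hmem : ∀ x : Int, x ∈ (pvLoop fl dp0).getD K PySem.Set.empty ↔
      x ∈ PySem.Set.ofList ((pvCombos K fl).map (pvFoldOr 0)) := by
    intro x
    rw [pvLoop_mem fl dp0 K hlen0 K le_rfl x, PySem.Set.mem_ofList, List.mem_map]
    constructor
    · rintro ⟨i, hi, y, hy, c, hc, rfl⟩
      cases i with
      | zero =>
        rw [hgd0] at hy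
        obtain rfl : y = 0 := by simpa using hy
        exact ⟨c, by simpa using hc, rfl⟩
      | succ i' =>
        rw [hgds i'] at hy
        exact absurd hy (by simp [PySem.Set.empty])
    · rintro ⟨c, hc, rfl⟩
      exact ⟨0, Nat.zero_le _, 0, by rw [hgd0]; simp, c, by simpa using hc, rfl⟩
  have hnodupB : ((pvLoop fl dp0).getD K PySem.Set.empty).Nodup := by
    apply pvLoop_nodup
    intro j
    cases j with
    | zero => rw [hgd0]; exact List.nodup_singleton 0
    | succ j' => rw [hgds j']; exact List.nodup_nil
  have hnodupA := PySem.Set.nodup_ofList ((pvCombos K fl).map (pvFoldOr 0))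
  have hlenEq : ((pvLoop fl dp0).getD K PySem.Set.empty).length
      = (PySem.Set.ofList ((pvCombos K fl).map (pvFoldOr 0))).length :=
    ((List.perm_ext_iff_of_nodup hnodupB hnodupA).2 hmem).length_eq
  have hk0 : ¬ k = 0 := by omega
  have hkneg : ¬ k < 0 := by omega
  have hkn : ¬ k > (fl.length : Int) := by omega
  simp only [fruit_combinations, fruit_combinations_alt, if_neg hk0, if_neg hkneg, if_neg hkn]
  rw [hAfold, ← hK, PySem.List.pyGetD_natCast]
  rw [PySem.Set.len_eq, PySem.Set.len_eq]
  simp only [Int.toNat_natCast]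
  exact_mod_cast hlenEq.symm

-- ===== VERDICT (by name: the statement is the Claim_ definition above) =====
theorem fruit_combinations_spec : Claim_equal_fruit_combinations := by
  intro fl k _hdom hpre
  obtain ⟨hk0, -⟩ := hpre
  unfold Spec_fruit_combinations
  by_cases hz : k = 0
  · subst hz; exact pvEq_zero fl
  · by_cases hb : (fl.length : Int) < k
    · exact pvEq_big fl k hk0 hb
    · exact pvEq_main fl k (by omega) (by omega)
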